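-- pv_equiv track=rewrite | github.com/caiwet/LLM_Proc_step2 | mimic3/retry_truncate.py | minimum_chunks
-- ===== SOURCE A (Python) =====
-- from typing import Dict, List, Optional
--
-- CHARS_PER_TOKEN   = 2        # conservative: 1 token ≈ 2 chars
--
-- MAX_PROMPT_TOKENS = 2000   # leaves room for output tokens inside a 16k context
--
-- MAX_CHUNKS        = 16        # hard ceiling on splits per note
--
-- def split_at_newline(text: str, target_char: int) -> tuple[str, str]:
--     """
--     Split *text* into (head, tail) trying to cut at the last \n\n before
--     *target_char*, then the last \n.  If no newline exists before
--     *target_char*, returns (text, "") — caller must use a larger chunk size.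
--     """
--     if target_char >= len(text):
--         return text, ""
--
--     cut = text.rfind('\n\n', 0, target_char)
--     if cut == -1:
--         cut = text.rfind('\n', 0, target_char)
--     if cut == -1:
--         return text, ""
--
--     return text[:cut], text[cut:].lstrip('\n')
--
-- def minimum_chunks(text: str,
--                    max_prompt_tokens: int = MAX_PROMPT_TOKENS,
--                    chars_per_token: int   = CHARS_PER_TOKEN,
--                    max_chunks: int        = MAX_CHUNKS) -> List[str]:
--     """
--     Return the fewest chunks such that each chunk's estimated token count
--     fits within *max_prompt_tokens*.
--     """
--     max_chars = max_prompt_tokens * chars_per_token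
--     if len(text) <= max_chars:
--         return [text]
--
--     for n in range(2, max_chunks + 1):
--         chunk_size = len(text) // n
--         if chunk_size <= max_chars:
--             chunks, remaining = [], text
--             for _ in range(n - 1):
--                 head, remaining = split_at_newline(remaining, chunk_size)
--                 chunks.append(head)
--                 if not remaining:
--                     break
--             if remaining:
--                 chunks.append(remaining)
--             return [c for c in chunks if c.strip()]
--
--     # Fallback: force max_chunks pieces
--     chunk_size = len(text) // max_chunks
--     chunks, remaining = [], text
--     for _ in range(max_chunks - 1):
--         head, remaining = split_at_newline(remaining, chunk_size)
--         chunks.append(head)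
--         if not remaining:
--             break
--     if remaining:
--         chunks.append(remaining)
--     return [c for c in chunks if c.strip()]
-- ===== SOURCE B (Python) =====
-- def split_at_newline(text: str, target_char: int) -> tuple[str, str]:
--     if target_char >= len(text):
--         return text, ""
--     cut = text.rfind('\n\n', 0, target_char)
--     if cut == -1:
--         cut = text.rfind('\n', 0, target_char)
--     if cut == -1:
--         return text, ""
--     return text[:cut], text[cut:].lstrip('\n')
--
--
-- def minimum_chunks(text, max_prompt_tokens=2000, chars_per_token=2, max_chunks=16):
--     """Fewest newline-aligned chunks under the token limit: the smallest
--     workable chunk count is computed in closed form instead of scanned for,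
--     and the chunk-building loop appears exactly once."""
--     max_chars = max_prompt_tokens * chars_per_token
--     if len(text) <= max_chars:
--         return [text]
--     # smallest n with len(text)//n <= max_chars is len(text)//(max_chars+1)+1;
--     # no positive budget means no n works, so force max_chunks pieces
--     if max_chars < 0:
--         n = max_chunks
--     else:
--         n = min(max(2, len(text) // (max_chars + 1) + 1), max_chunks)
--     chunk_size = len(text) // n
--     chunks, remaining = [], text
--     for _ in range(n - 1):
--         head, remaining = split_at_newline(remaining, chunk_size)
--         chunks.append(head)
--         if not remaining:
--             break
--     if remaining:
--         chunks.append(remaining)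
--     return [c for c in chunks if c.strip()]
-- ===== Notes on version B (the rewrite author's own statement) =====
-- stated objective: simpler
-- what changed: The linear scan for the first chunk count n with len(text)//n <= max_chars is replaced by the closed form min(max(2, len(text)//(max_chars+1)+1), max_chunks), and the duplicated chunk-building loop (in-scan body and fallback block) is merged into a single loop run once.
import Mathlib
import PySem

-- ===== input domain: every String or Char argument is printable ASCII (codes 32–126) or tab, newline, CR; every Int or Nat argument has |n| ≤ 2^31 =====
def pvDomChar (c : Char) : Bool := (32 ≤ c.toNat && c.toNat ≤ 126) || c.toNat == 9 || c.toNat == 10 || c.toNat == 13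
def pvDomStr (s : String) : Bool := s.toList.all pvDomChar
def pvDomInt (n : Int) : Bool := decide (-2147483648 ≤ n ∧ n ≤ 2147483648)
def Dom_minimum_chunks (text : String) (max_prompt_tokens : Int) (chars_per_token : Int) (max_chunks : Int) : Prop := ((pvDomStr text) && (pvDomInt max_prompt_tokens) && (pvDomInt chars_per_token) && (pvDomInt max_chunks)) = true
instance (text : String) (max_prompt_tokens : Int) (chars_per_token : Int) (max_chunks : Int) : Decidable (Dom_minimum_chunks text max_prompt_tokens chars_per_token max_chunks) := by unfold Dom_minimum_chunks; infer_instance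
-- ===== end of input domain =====

-- B replaces A's linear scan for the first workable chunk count by a closed-form
-- count and merges A's duplicated chunk-building fallback into one loop (simpler).


-- ===== PORT A =====
-- s.lstrip('\n'): hand port (PySem has lstrip for whitespace only); exact — drops leading '\n' chars
def pyLstripNl (s : String) : String := String.ofList (s.toList.dropWhile (· == '\n'))

def split_at_newline (text : String) (target_char : Int) : String × String :=
  if PySem.Str.len text ≤ target_char then (text, "")
  else
    let cut := PySem.Str.rfindFrom text "\n\n" 0 (some target_char)
    let cut := if cut = -1 then PySem.Str.rfindFrom text "\n" 0 (some target_char) else cut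
    if cut = -1 then (text, "")
    else (PySem.Str.slice text none (some cut), pyLstripNl (PySem.Str.slice text (some cut) none))

-- the inner chunk-building loop (identical source text at A's two sites and in B):
-- 'for _ in range(n-1): head, remaining = split_at_newline(...); chunks.append(head); if not remaining: break'
-- then 'if remaining: chunks.append(remaining)'; counter k = (n-1) clamped at 0 like range
def buildChunks (chunk_size : Int) : Nat → String → List String
  | 0, remaining => if remaining = "" then [] else [remaining]
  | k + 1, remaining =>
      let p := split_at_newline remaining chunk_size
      if p.2 = "" then [p.1] else p.1 :: buildChunks chunk_size k p.2

-- '[c for c in chunks if c.strip()]'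
def keepNonBlank (cs : List String) : List String :=
  cs.filter (fun c => decide (PySem.Str.strip c ≠ ""))

-- A's 'for n in range(2, max_chunks+1)' scan; [] = fell through to the fallback block
def scanA (text : String) (max_chars max_chunks : Int) : List Int → List String
  | [] =>
      let chunk_size := PySem.Int.floordiv (PySem.Str.len text) max_chunks
      keepNonBlank (buildChunks chunk_size (max_chunks - 1).toNat text)
  | n :: ns =>
      let chunk_size := PySem.Int.floordiv (PySem.Str.len text) n
      if chunk_size ≤ max_chars then
        keepNonBlank (buildChunks chunk_size (n - 1).toNat text)
      else scanA text max_chars max_chunks ns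

def minimum_chunks (text : String) (max_prompt_tokens : Int) (chars_per_token : Int) (max_chunks : Int) : List String :=
  let max_chars := max_prompt_tokens * chars_per_token
  if PySem.Str.len text ≤ max_chars then [text]
  else scanA text max_chars max_chunks (PySem.List.pyRange 2 (max_chunks + 1) 1)

-- ===== PORT B =====
def minimum_chunks_alt (text : String) (max_prompt_tokens : Int) (chars_per_token : Int) (max_chunks : Int) : List String :=
  let max_chars := max_prompt_tokens * chars_per_token
  if PySem.Str.len text ≤ max_chars then [text]
  else
    let n := if max_chars < 0 then max_chunks
             else min (max 2 (PySem.Int.floordiv (PySem.Str.len text) (max_chars + 1) + 1)) max_chunks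
    let chunk_size := PySem.Int.floordiv (PySem.Str.len text) n
    keepNonBlank (buildChunks chunk_size (n - 1).toNat text)

-- ===== PRECONDITION & SPEC =====
-- Pre_ excludes only the inputs where Python A raises ZeroDivisionError: text longer
-- than the character budget together with max_chunks = 0 (the fallback divides by it).
def Pre_minimum_chunks (text : String) (max_prompt_tokens : Int) (chars_per_token : Int) (max_chunks : Int) : Prop :=
  PySem.Str.len text ≤ max_prompt_tokens * chars_per_token ∨ max_chunks ≠ 0
instance (text : String) (max_prompt_tokens : Int) (chars_per_token : Int) (max_chunks : Int) : Decidable (Pre_minimum_chunks text max_prompt_tokens chars_per_token max_chunks) := by unfold Pre_minimum_chunks; infer_instance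

def pvWitness_minimum_chunks : String × Int × Int × Int := ("a\nbb\ncc", 1, 2, 3)

def Spec_minimum_chunks (text : String) (max_prompt_tokens : Int) (chars_per_token : Int) (max_chunks : Int) (out : List String) : Prop := out = minimum_chunks_alt text max_prompt_tokens chars_per_token max_chunks
instance (text : String) (max_prompt_tokens : Int) (chars_per_token : Int) (max_chunks : Int) (out : List String) : Decidable (Spec_minimum_chunks text max_prompt_tokens chars_per_token max_chunks out) := by unfold Spec_minimum_chunks; infer_instance

-- ===== CLAIM (what is proved, stated in full; the proofs are below) =====
def Claim_equal_minimum_chunks : Prop := ∀ (text : String) (max_prompt_tokens : Int) (chars_per_token : Int) (max_chunks : Int), Dom_minimum_chunks text max_prompt_tokens chars_per_token max_chunks → Pre_minimum_chunks text max_prompt_tokens chars_per_token max_chunks → Spec_minimum_chunks text max_prompt_tokens chars_per_token max_chunks (minimum_chunks text max_prompt_tokens chars_per_token max_chunks)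

-- ===== LEMMAS AND PROOFS =====

theorem len_nonneg (s : String) : 0 ≤ PySem.Str.len s := by
  simp [PySem.Str.len_eq]

-- the qualifying test of A's scan, characterised: for 0 < n and 0 ≤ max_chars,
-- len//n ≤ max_chars  ↔  len//(max_chars+1)+1 ≤ n
theorem qualifies_iff (L mx n : Int) (hn : 0 < n) (hmx : 0 ≤ mx) :
    PySem.Int.floordiv L n ≤ mx ↔ PySem.Int.floordiv L (mx + 1) + 1 ≤ n := by
  have h1 : PySem.Int.floordiv L n < mx + 1 ↔ L < (mx + 1) * n :=
    PySem.Int.floordiv_lt_iff_lt_mul hn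
  have h2 : PySem.Int.floordiv L (mx + 1) < n ↔ L < n * (mx + 1) :=
    PySem.Int.floordiv_lt_iff_lt_mul (by omega)
  rw [mul_comm] at h2
  constructor
  · intro h
    have := h2.mpr (h1.mp (by omega))
    omega
  · intro h
    have := h1.mpr (h2.mp (by omega))
    omega

theorem scanA_all_fail (text : String) (mx mc : Int) (ns : List Int)
    (h : ∀ n ∈ ns, ¬ PySem.Int.floordiv (PySem.Str.len text) n ≤ mx) :
    scanA text mx mc ns = scanA text mx mc [] := by
  induction ns with
  | nil => rfl
  | cons n ns ih =>
      have := h n (by simp)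
      simp only [scanA, if_neg this]
      exact ih (fun m hm => h m (by simp [hm]))

theorem scanA_hit (text : String) (mx mc n0 : Int) (h0 : 2 ≤ n0) (hmc : n0 ≤ mc)
    (hq : ∀ n, 0 < n → (PySem.Int.floordiv (PySem.Str.len text) n ≤ mx ↔ n0 ≤ n)) :
    ∀ (k : Nat) (a : Int), a = n0 - k → 2 ≤ a →
    scanA text mx mc (PySem.List.pyRange a (mc + 1) 1) =
      keepNonBlank (buildChunks (PySem.Int.floordiv (PySem.Str.len text) n0) (n0 - 1).toNat text) := by
  intro k
  induction k with
  | zero =>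
      intro a ha h2
      have : a = n0 := by omega
      subst this
      rw [PySem.List.pyRange_one_cons (by omega)]
      simp only [scanA, if_pos ((hq a (by omega)).mpr (by omega))]
  | succ k ih =>
      intro a ha h2
      rw [PySem.List.pyRange_one_cons (by omega)]
      simp only [scanA]
      rw [if_neg, ih (a + 1) (by omega) (by omega)]
      intro hcontra
      have := (hq a (by omega)).mp hcontra
      omega

-- ===== VERDICT (by name: the statement is the Claim_ definition above) =====
theorem minimum_chunks_spec : Claim_equal_minimum_chunks := by
  intro text mpt cpt mc _hdom hpre
  unfold Spec_minimum_chunks minimum_chunks minimum_chunks_alt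
  have hL0 : 0 ≤ PySem.Str.len text := len_nonneg text
  by_cases hfits : PySem.Str.len text ≤ mpt * cpt
  · simp only [if_pos hfits]
  · simp only [if_neg hfits]
    by_cases hneg : mpt * cpt < 0
    · -- every n in [2, max_chunks] fails; A falls back to max_chunks pieces, B picks n = max_chunks
      rw [scanA_all_fail]
      · simp only [scanA, if_pos hneg]
      · intro n hn
        have hmem := PySem.List.mem_pyRange_one.mp hn
        have hnn : 0 ≤ PySem.Int.floordiv (PySem.Str.len text) n := by
          rw [PySem.Int.floordiv_eq_ediv_of_pos (by omega)]
          exact Int.ediv_nonneg hL0 (by omega)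
        omega
    · have hmx : 0 ≤ mpt * cpt := by omega
      have hq : ∀ n, 0 < n → (PySem.Int.floordiv (PySem.Str.len text) n ≤ mpt * cpt ↔
          PySem.Int.floordiv (PySem.Str.len text) (mpt * cpt + 1) + 1 ≤ n) :=
        fun n hn => qualifies_iff (PySem.Str.len text) (mpt * cpt) n hn hmx
      have h2n0 : 2 ≤ PySem.Int.floordiv (PySem.Str.len text) (mpt * cpt + 1) + 1 := by
        have h1 : 1 ≤ PySem.Int.floordiv (PySem.Str.len text) (mpt * cpt + 1) := by
          rw [PySem.Int.le_floordiv_iff_mul_le (by omega)]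
          omega
        omega
      by_cases hle : PySem.Int.floordiv (PySem.Str.len text) (mpt * cpt + 1) + 1 ≤ mc
      · rw [scanA_hit text (mpt * cpt) mc _ h2n0 hle hq
            (PySem.Int.floordiv (PySem.Str.len text) (mpt * cpt + 1) + 1 - 2).toNat 2 (by omega) (by omega)]
        simp only [if_neg hneg]
        rw [max_eq_right (by omega), min_eq_left hle]
      · -- no n in [2, max_chunks] qualifies; A falls back, B clamps n to max_chunks
        rw [scanA_all_fail]
        · simp only [scanA, if_neg hneg]
          rw [max_eq_right (by omega), min_eq_right (by omega)]
        · intro n hn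
          have hmem := PySem.List.mem_pyRange_one.mp hn
          intro hcontra
          have := (hq n (by omega)).mp hcontra
          omega

theorem pvWitness_ok : Dom_minimum_chunks pvWitness_minimum_chunks.1 pvWitness_minimum_chunks.2.1 pvWitness_minimum_chunks.2.2.1 pvWitness_minimum_chunks.2.2.2 ∧ Pre_minimum_chunks pvWitness_minimum_chunks.1 pvWitness_minimum_chunks.2.1 pvWitness_minimum_chunks.2.2.1 pvWitness_minimum_chunks.2.2.2 := by
  decide
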